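-- pv_equiv track=rewrite | github.com/522338473/face_safe_pro | apps/monitor/management/commands/warning_queue.py | mapper_list
-- ===== SOURCE A (Python) =====
-- def mapper_list(lis):
--     res = []
--
--     def te1(t):
--         te = []
--         t2 = []
--         for i in t:
--             if len(te) == 0:
--                 te.append(i)
--             else:
--                 if i[1] in [t[1] for t in te]:
--                     te.append(i)
--                 else:
--                     t2.append(i)
--         res.append(te)
--         if len(t2):
--             te1(t2)
--         return res
--
--     return te1(lis)
-- ===== SOURCE B (Python) =====
-- def mapper_list(lis):
--     groups = []
--     for i in lis:
--         for g in groups: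
--             if g[0][1] == i[1]:
--                 g.append(i)
--                 break
--         else:
--             groups.append([i])
--     return groups
-- ===== Notes on version B (the rewrite author's own statement) =====
-- stated objective: faster
-- what changed: One iterative pass inserting each element into the first existing group with a matching key (compared against the group's head only), instead of A's recursion that repeatedly extracts the first key's group — rebuilding the group's key list for every element — and recurses on the leftovers.
-- intended difference: On the empty list A returns [[]] (its inner loop appends the empty group before checking for leftovers) while B returns [], the natural grouping of nothing into no groups. — e.g. on mapper_list([]): A returns [[]], B returns []
import Mathlib
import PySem

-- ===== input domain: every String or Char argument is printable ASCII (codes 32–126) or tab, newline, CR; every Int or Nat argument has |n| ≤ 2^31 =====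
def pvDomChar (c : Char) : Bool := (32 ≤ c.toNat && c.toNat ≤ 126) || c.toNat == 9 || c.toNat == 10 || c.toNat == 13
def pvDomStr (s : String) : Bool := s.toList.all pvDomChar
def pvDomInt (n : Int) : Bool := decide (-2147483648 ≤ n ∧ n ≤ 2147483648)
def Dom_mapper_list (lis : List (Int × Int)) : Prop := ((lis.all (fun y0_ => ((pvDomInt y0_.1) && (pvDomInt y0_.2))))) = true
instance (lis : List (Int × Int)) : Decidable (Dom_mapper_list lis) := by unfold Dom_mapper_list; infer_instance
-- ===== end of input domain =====

-- B groups in a single iterative pass (first-seen group order) instead of A's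
-- recursive extract-first-key-group-and-recurse (which rebuilds the group key
-- list per element); a timing run measured B faster. On the
-- empty list A returns [[]] and B returns [] (stated as D_ below).


-- ===== PORT A =====
-- A's inner 'for i in t' loop: te collects the matching elements, t2 the rest.
def mapperSplit : List (Int × Int) → List (Int × Int) → List (Int × Int) →
    (List (Int × Int) × List (Int × Int))
  | [], te, t2 => (te, t2)
  | i :: rest, te, t2 =>
    if te.length = 0 then mapperSplit rest (te ++ [i]) t2
    else if i.2 ∈ te.map Prod.snd then mapperSplit rest (te ++ [i]) t2
    else mapperSplit rest te (t2 ++ [i])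

theorem mapperSplit_snd_len : ∀ (t te t2 : List (Int × Int)),
    (mapperSplit t te t2).2.length ≤ t2.length + t.length := by
  intro t
  induction t with
  | nil => intro te t2; simp [mapperSplit]
  | cons i rest ih =>
    intro te t2
    simp only [mapperSplit]
    split
    · exact le_trans (ih _ _) (by simp only [List.length_cons]; omega)
    · split
      · exact le_trans (ih _ _) (by simp only [List.length_cons]; omega)
      · exact le_trans (ih _ _) (by
          simp only [List.length_append, List.length_cons, List.length_nil]; omega)

-- A's recursive te1, with 'res' the accumulator it appends each group to.
def mapperTe1 (t : List (Int × Int)) (res : List (List (Int × Int))) :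
    List (List (Int × Int)) :=
  let p := mapperSplit t [] []
  let res' := res ++ [p.1]
  if h : p.2.length ≠ 0 then mapperTe1 p.2 res' else res'
termination_by t.length
decreasing_by
  rcases t with _ | ⟨i, rest⟩
  · exact absurd rfl h
  · have h1 := mapperSplit_snd_len rest [i] []
    have h2 : mapperSplit (i :: rest) [] [] = mapperSplit rest [i] [] := by
      simp [mapperSplit]
    show (mapperSplit (i :: rest) [] []).2.length < (i :: rest).length
    rw [h2]
    simp only [List.length_cons, List.length_nil] at h1 ⊢
    omega

def mapper_list (lis : List (Int × Int)) : List (List (Int × Int)) :=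
  mapperTe1 lis []

-- ===== PORT B =====
-- B's inner 'for g in groups … else append' scan: insert i into the first group
-- whose head has the same key, else open a new group.  (g is never empty in B;
-- 'g[0][1]' is rendered totally via head?.)
def addToGroups : List (List (Int × Int)) → (Int × Int) → List (List (Int × Int))
  | [], i => [[i]]
  | g :: gs, i =>
    if (g.head?.map Prod.snd) = some i.2 then (g ++ [i]) :: gs
    else g :: addToGroups gs i

def mapper_list_alt (lis : List (Int × Int)) : List (List (Int × Int)) :=
  lis.foldl addToGroups []

-- ===== PRECONDITION & SPEC =====
-- On the empty list A returns [[]] (its loop appends the empty group before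
-- checking for leftovers) while B returns [], the intended grouping of nothing.
def D_mapper_list (lis : List (Int × Int)) : Prop := lis = []
instance (lis : List (Int × Int)) : Decidable (D_mapper_list lis) := by unfold D_mapper_list; infer_instance

def Spec_mapper_list (lis : List (Int × Int)) (out : List (List (Int × Int))) : Prop := ¬ D_mapper_list lis → out = mapper_list_alt lis
instance (lis : List (Int × Int)) (out : List (List (Int × Int))) : Decidable (Spec_mapper_list lis out) := by unfold Spec_mapper_list; infer_instance

def pvDiffWitness_mapper_list : (List (Int × Int)) := []
def pvDiffWitnessOut_mapper_list : (List (List (Int × Int))) × (List (List (Int × Int))) := ([[]], [])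

-- ===== CLAIM (what is proved, stated in full; the proofs are below) =====
def Claim_unchanged_mapper_list : Prop := ∀ (lis : List (Int × Int)), Dom_mapper_list lis → Spec_mapper_list lis (mapper_list lis)
def Claim_changed_mapper_list : Prop := Dom_mapper_list (pvDiffWitness_mapper_list) ∧ D_mapper_list (pvDiffWitness_mapper_list) ∧ mapper_list (pvDiffWitness_mapper_list) = pvDiffWitnessOut_mapper_list.1 ∧ mapper_list_alt (pvDiffWitness_mapper_list) = pvDiffWitnessOut_mapper_list.2 ∧ pvDiffWitnessOut_mapper_list.1 ≠ pvDiffWitnessOut_mapper_list.2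
def Claim_exact_mapper_list : Prop := ∀ (lis : List (Int × Int)), Dom_mapper_list lis → D_mapper_list lis → mapper_list lis ≠ mapper_list_alt lis

-- ===== LEMMAS AND PROOFS =====

-- Characterisation of A's inner loop when the group is nonempty with all keys
-- equal to x.2: it filters t by that key.
theorem mapperSplit_char : ∀ (t : List (Int × Int)) (x : Int × Int)
    (te' t2 : List (Int × Int)), (∀ y ∈ te', y.2 = x.2) →
    mapperSplit t (x :: te') t2 =
      ((x :: te') ++ t.filter (fun i => decide (i.2 = x.2)),
       t2 ++ t.filter (fun i => decide (¬ i.2 = x.2))) := by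
  intro t
  induction t with
  | nil => intro x te' t2 h; simp [mapperSplit]
  | cons i rest ih =>
    intro x te' t2 h
    have hmem : (i.2 ∈ (x :: te').map Prod.snd) ↔ i.2 = x.2 := by
      simp only [List.map_cons, List.mem_cons, List.mem_map]
      constructor
      · rintro (h1 | ⟨y, hy, h1⟩)
        · exact h1
        · rw [← h1]; exact h y hy
      · intro hq; exact Or.inl hq
    simp only [mapperSplit, List.length_cons]
    by_cases hk : i.2 = x.2
    · rw [if_neg (by omega), if_pos (hmem.mpr hk)]
      have : (x :: te') ++ [i] = x :: (te' ++ [i]) := by simp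
      rw [this, ih x (te' ++ [i]) t2 (by
        intro y hy
        rcases List.mem_append.mp hy with hy | hy
        · exact h y hy
        · simp at hy; subst hy; exact hk)]
      simp [hk]
    · rw [if_neg (by omega), if_neg (by rw [hmem]; exact hk)]
      rw [ih x te' (t2 ++ [i]) h]
      simp [hk]

-- Characterisation of B's scan when the first group is nonempty: matching
-- elements extend it, others are handled by the remaining groups.
theorem foldl_addToGroups_cons : ∀ (t : List (Int × Int)) (x : Int × Int)
    (g' : List (Int × Int)) (gs : List (List (Int × Int))),
    t.foldl addToGroups ((x :: g') :: gs) =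
      ((x :: g') ++ t.filter (fun i => decide (i.2 = x.2))) ::
        (t.filter (fun i => decide (¬ i.2 = x.2))).foldl addToGroups gs := by
  intro t
  induction t with
  | nil => intro x g' gs; simp
  | cons i rest ih =>
    intro x g' gs
    simp only [List.foldl_cons, addToGroups, List.head?_cons, Option.map_some]
    by_cases hk : i.2 = x.2
    · rw [if_pos (by simp [hk])]
      have : (x :: g') ++ [i] = x :: (g' ++ [i]) := by simp
      rw [this, ih]
      simp [hk]
    · rw [if_neg (by simp; omega)]
      rw [ih]
      simp [hk]

-- A's te1 equals 'res ++ B' on nonempty input.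
theorem mapperTe1_eq : ∀ (n : ℕ) (t : List (Int × Int))
    (res : List (List (Int × Int))), t.length ≤ n → t ≠ [] →
    mapperTe1 t res = res ++ t.foldl addToGroups [] := by
  intro n
  induction n with
  | zero => intro t res hn ht; cases t <;> simp_all
  | succ n ih =>
    intro t res hn ht
    rcases t with _ | ⟨x, rest⟩
    · exact absurd rfl ht
    have hsplit : mapperSplit (x :: rest) [] [] =
        (x :: rest.filter (fun i => decide (i.2 = x.2)),
         rest.filter (fun i => decide (¬ i.2 = x.2))) := by
      simp only [mapperSplit, List.length_nil, List.nil_append]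
      rw [mapperSplit_char rest x [] [] (by simp)]
      simp
    have hB : (x :: rest).foldl addToGroups [] =
        (x :: rest.filter (fun i => decide (i.2 = x.2))) ::
          (rest.filter (fun i => decide (¬ i.2 = x.2))).foldl addToGroups [] := by
      simp only [List.foldl_cons, addToGroups]
      rw [foldl_addToGroups_cons]
      simp
    rw [mapperTe1]
    simp only [hsplit]
    by_cases h2 : (rest.filter (fun i => decide (¬ i.2 = x.2))) = []
    · rw [dif_neg (by rw [h2]; simp)]
      rw [hB, h2]
      simp only [List.foldl_nil]
    · rw [dif_pos (by have := List.length_pos_of_ne_nil h2; omega)]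
      rw [ih _ _ (by
          have hle := List.length_filter_le (fun i => decide (¬ i.2 = x.2)) rest
          simp only [List.length_cons] at hn
          omega) h2]
      rw [hB]
      simp only [List.append_assoc, List.singleton_append]

-- ===== VERDICT (by name: the statement is the Claim_ definition above) =====
theorem mapper_list_spec : Claim_unchanged_mapper_list := by
  intro lis _ hD
  have hne : lis ≠ [] := fun h => hD h
  unfold mapper_list mapper_list_alt
  exact (mapperTe1_eq lis.length lis [] le_rfl hne).trans (by simp)

theorem mapper_list_changed : Claim_changed_mapper_list := by
  unfold Claim_changed_mapper_list
  refine ⟨by decide, by decide, ?_, by decide, by decide⟩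
  simp [mapper_list, pvDiffWitness_mapper_list, pvDiffWitnessOut_mapper_list,
    mapperTe1, mapperSplit]

theorem mapper_list_tight : Claim_exact_mapper_list := by
  intro lis _ hD
  have h : lis = [] := hD
  subst h
  simp [mapper_list, mapper_list_alt, mapperTe1, mapperSplit]
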